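-- pv_equiv track=rewrite | github.com/artyzhang/Parking-Regulations-Parser | Parking_Regulation_parser_v1.py | remove_extraneous
-- ===== SOURCE A (Python) =====
-- def remove_extraneous(lst):
--     extrasremoved = []
--     extraneouslist = []
--     mightbe = 0
--     for value in lst:
--         value = value.strip()
--         if value in ['','and','from','of']:
--             mightbe += 1
--         else:
--             extrasremoved.append(mightbe)
--             mightbe += 1
--     for valuee in extrasremoved:
--         extraneouslist.append(lst[valuee].strip())
--     return extraneouslist
-- ===== SOURCE B (Python) =====
-- def remove_extraneous(lst):
--     result = []
--     for value in lst:
--         s = value.strip()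
--         if s not in ('', 'and', 'from', 'of'):
--             result.append(s)
--     return result
-- ===== Notes on version B (the rewrite author's own statement) =====
-- stated objective: simpler
-- what changed: Replaced A's two-pass scheme (collect kept indices with a running counter, then a second pass re-indexing into lst and re-stripping) by a single pass that strips each value once and appends it directly when it is not a stopword.
import Mathlib
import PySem

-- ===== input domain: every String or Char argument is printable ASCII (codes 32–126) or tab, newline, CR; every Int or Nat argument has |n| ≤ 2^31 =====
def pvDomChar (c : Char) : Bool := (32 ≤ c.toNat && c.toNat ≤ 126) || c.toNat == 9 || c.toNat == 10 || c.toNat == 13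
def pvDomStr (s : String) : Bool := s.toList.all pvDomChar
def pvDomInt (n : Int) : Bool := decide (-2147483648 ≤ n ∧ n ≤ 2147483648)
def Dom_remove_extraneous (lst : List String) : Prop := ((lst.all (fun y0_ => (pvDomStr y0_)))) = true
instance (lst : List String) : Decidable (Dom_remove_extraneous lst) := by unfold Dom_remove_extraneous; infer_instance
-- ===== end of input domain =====

-- B replaces A's two passes (index collection + re-indexing into lst) by one direct pass; objective: simpler.

-- ===== PORT A =====
-- first loop's body: state = (extrasremoved, mightbe)
def pvStepA (st : List Int × Int) (value : String) : List Int × Int :=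
  let value := PySem.Str.strip value
  if value ∈ (["", "and", "from", "of"] : List String) then
    (st.1, st.2 + 1)
  else
    (st.1 ++ [st.2], st.2 + 1)

def remove_extraneous (lst : List String) : List String :=
  let extrasremoved := (lst.foldl pvStepA ([], 0)).1
  -- lst[valuee]: the stored indices are always in range, so the .getD "" default is never used
  extrasremoved.foldl
    (fun extraneouslist valuee =>
      extraneouslist ++ [PySem.Str.strip ((PySem.List.pyGet? lst valuee).getD "")]) []

-- ===== PORT B =====
def pvStepB (acc : List String) (value : String) : List String :=
  let s := PySem.Str.strip value
  if s ∈ (["", "and", "from", "of"] : List String) then acc else acc ++ [s]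

def remove_extraneous_alt (lst : List String) : List String :=
  lst.foldl pvStepB []

-- ===== PRECONDITION & SPEC =====
def Spec_remove_extraneous (lst : List String) (out : List String) : Prop := out = remove_extraneous_alt lst
instance (lst : List String) (out : List String) : Decidable (Spec_remove_extraneous lst out) := by unfold Spec_remove_extraneous; infer_instance

-- ===== CLAIM (what is proved, stated in full; the proofs are below) =====
def Claim_equal_remove_extraneous : Prop := ∀ (lst : List String), Dom_remove_extraneous lst → Spec_remove_extraneous lst (remove_extraneous lst)

-- ===== LEMMAS AND PROOFS =====

-- the indices A's first loop keeps, starting from counter n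
def keptIdx : List String → Int → List Int
  | [], _ => []
  | v :: r, n =>
    if PySem.Str.strip v ∈ (["", "and", "from", "of"] : List String) then keptIdx r (n + 1)
    else n :: keptIdx r (n + 1)

lemma foldA_fst (r : List String) : ∀ (acc : List Int) (n : Int),
    (r.foldl pvStepA (acc, n)).1 = acc ++ keptIdx r n := by
  induction r with
  | nil => intro acc n; simp [keptIdx]
  | cons v r ih =>
    intro acc n
    simp only [List.foldl_cons, pvStepA, keptIdx]
    split_ifs with h <;> simp [ih]

lemma foldIdx (r : List String) : ∀ (pre : List String) (acc : List String),
    (keptIdx r (pre.length : Int)).foldl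
      (fun a i => a ++ [PySem.Str.strip ((PySem.List.pyGet? (pre ++ r) i).getD "")]) acc
    = r.foldl pvStepB acc := by
  induction r with
  | nil => intro pre acc; simp [keptIdx]
  | cons v r ih =>
    intro pre acc
    have hlen : ((pre.length : Int) + 1) = ((pre ++ [v]).length : Int) := by
      simp
    have hassoc : pre ++ v :: r = (pre ++ [v]) ++ r := by simp
    simp only [keptIdx, List.foldl_cons, pvStepB]
    split_ifs with h
    · rw [hlen, hassoc, ih (pre ++ [v]) acc]
    · rw [List.foldl_cons]
      rw [show (PySem.List.pyGet? (pre ++ v :: r) (pre.length : Int)).getD "" = v from by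
        rw [PySem.List.pyGet?_append_length]; rfl]
      rw [hlen, hassoc, ih (pre ++ [v]) (acc ++ [PySem.Str.strip v])]

-- ===== VERDICT (by name: the statement is the Claim_ definition above) =====
theorem remove_extraneous_spec : Claim_equal_remove_extraneous := by
  intro lst _
  unfold Spec_remove_extraneous remove_extraneous remove_extraneous_alt
  have h0 : (lst.foldl pvStepA ([], 0)).1 = keptIdx lst 0 := by
    simpa using foldA_fst lst [] 0
  rw [h0]
  have := foldIdx lst [] []
  simpa using this
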